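-- pv_equiv track=rewrite | github.com/AndreaCavis/Python-exercises | unit_3/task2.py | original_solution
-- ===== SOURCE A (Python) =====
-- def original_solution(sentence):
--     words = [word.lower() for word in sentence.split()]
--     result = ""
--
--     for word in words:
--         if len(word) % 2 != 0:
--             max_occurence = 0
--             recurring_chars = {}
--
--             for i in range(len(word)):
--                 if word[i] in recurring_chars:
--                     recurring_chars[word[i]] += 1
--                 else:
--                     recurring_chars[word[i]] = 1
--
--                 if recurring_chars[word[i]] > max_occurence:
--                         max_occurence = recurring_chars[word[i]]
--
--             for char in recurring_chars:
--                 if recurring_chars[char] == max_occurence: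
--                     result += char
--                     break
--
--     return result
-- ===== SOURCE B (Python) =====
-- def original_solution(sentence):
--     picks = []
--     for word in sentence.split():
--         w = word.lower()
--         if len(w) % 2:
--             # count by sorting: equal chars are adjacent in sorted(w), so a
--             # run-length encoding of sorted(w) yields each distinct char with its count
--             runs = []
--             for c in sorted(w):
--                 if runs and runs[-1][0] == c:
--                     runs[-1] = (c, runs[-1][1] + 1)
--                 else:
--                     runs.append((c, 1))
--             # pick the run with the largest count, breaking ties by the char's
--             # first occurrence in w (A's dict-insertion-order tie-break, made explicit)
--             best = min(runs, key=lambda r: (-r[1], w.index(r[0])))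
--             picks.append(best[0])
--     return "".join(picks)
-- ===== Notes on version B (the rewrite author's own statement) =====
-- stated objective: alternative
-- what changed: A counts with a hand-rolled dict plus a running max and a second insertion-order rescan; B counts by sorting each word and run-length-encoding the sorted characters (equal chars become adjacent runs), then selects the best run with a single keyed min whose explicit (-count, first-occurrence-index) key replaces A's implicit dict-order tie-break.
import Mathlib
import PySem

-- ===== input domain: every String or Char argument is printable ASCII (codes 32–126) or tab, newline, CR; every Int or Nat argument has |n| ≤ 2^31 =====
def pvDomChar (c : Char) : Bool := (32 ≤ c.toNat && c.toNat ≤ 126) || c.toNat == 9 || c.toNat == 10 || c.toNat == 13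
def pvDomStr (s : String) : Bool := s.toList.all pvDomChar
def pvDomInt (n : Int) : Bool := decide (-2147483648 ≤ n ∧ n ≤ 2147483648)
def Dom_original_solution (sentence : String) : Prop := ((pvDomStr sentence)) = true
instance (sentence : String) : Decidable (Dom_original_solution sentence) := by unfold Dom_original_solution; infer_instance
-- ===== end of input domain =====

-- B counts by sorting each odd word and run-length-encoding the sorted characters, then picks
-- the best run by a keyed min with an explicit (-count, first-occurrence-index) tie-break,
-- replacing A's counting dict, running max and insertion-order rescan (objective: alternative).

-- ===== PORT A =====
-- one inner-loop step of A: update the counting dict for char word[i], then the running max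
def pvStepA (p : Int × PySem.Dict Char Int) (c : Char) : Int × PySem.Dict Char Int :=
  let d := if (p.2.get? c).isSome then p.2.insert c (p.2.getD c 0 + 1) else p.2.insert c 1
  (if d.getD c 0 > p.1 then d.getD c 0 else p.1, d)

def original_solution (sentence : String) : String :=
  let words := (PySem.Str.split₀ sentence).map PySem.Str.lower
  words.foldl (fun result word =>
    if PySem.Str.len word % 2 ≠ 0 then
      let st := (PySem.List.pyRange 0 (PySem.Str.len word)).foldl
        (fun p i => pvStepA p (PySem.List.pyGetD word.toList i ' '))
        ((0 : Int), (PySem.Dict.empty : PySem.Dict Char Int))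
      match st.2.items.find? (fun kv => kv.2 == st.1) with
      | some kv => result ++ String.ofList [kv.1]
      | none => result
    else result) ""

-- ===== PORT B =====
-- one step of B's run-length grouping loop over the sorted characters:
-- 'if runs and runs[-1][0] == c: runs[-1] = (c, runs[-1][1] + 1) else: runs.append((c, 1))'
def pvRunsStep (runs : List (Char × Int)) (c : Char) : List (Char × Int) :=
  if runs ≠ [] ∧ (PySem.List.pyGetD runs (-1) (' ', 0)).1 = c then
    PySem.List.pySetD runs (-1) (c, (PySem.List.pyGetD runs (-1) (' ', 0)).2 + 1)
  else runs ++ [(c, 1)]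

-- per odd word: run-length-encode sorted(w), then min(runs, key=lambda r: (-r[1], w.index(r[0]))).
-- w.index(r[0]) is ported as PySem.Str.find: exact here because r[0] always occurs in w;
-- the none branch is min() of an empty runs list, unreachable (odd-length words are nonempty).
def pvPickB (w : String) : String :=
  let runs := (PySem.List.sorted w.toList (fun c => c) false).foldl pvRunsStep []
  match PySem.List.min2? runs (fun r => -r.2) (fun r => PySem.Str.find w (String.ofList [r.1])) with
  | some r => String.ofList [r.1]
  | none => ""

def original_solution_alt (sentence : String) : String :=
  let picks := (PySem.Str.split₀ sentence).foldl (fun picks word =>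
    let w := PySem.Str.lower word
    if PySem.Str.len w % 2 == 1 then picks ++ [pvPickB w] else picks) ([] : List String)
  PySem.Str.join "" picks

-- ===== PRECONDITION & SPEC =====
def Spec_original_solution (sentence : String) (out : String) : Prop := out = original_solution_alt sentence
instance (sentence : String) (out : String) : Decidable (Spec_original_solution sentence out) := by unfold Spec_original_solution; infer_instance

-- ===== CLAIM (what is proved, stated in full; the proofs are below) =====
def Claim_equal_original_solution : Prop := ∀ (sentence : String), Dom_original_solution sentence → Spec_original_solution sentence (original_solution sentence)

-- ===== LEMMAS AND PROOFS =====

-- A's step with the two dict branches unified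
theorem pvStepA_eq (p : Int × PySem.Dict Char Int) (c : Char) :
    pvStepA p c =
      (if p.2.getD c 0 + 1 > p.1 then p.2.getD c 0 + 1 else p.1,
       p.2.insert c (p.2.getD c 0 + 1)) := by
  unfold pvStepA
  have hins : (if (p.2.get? c).isSome then p.2.insert c (p.2.getD c 0 + 1) else p.2.insert c 1)
      = p.2.insert c (p.2.getD c 0 + 1) := by
    cases h : p.2.get? c <;> simp [PySem.Dict.getD, h]
  rw [hins]
  simp

-- the dict part of A's inner loop is the standard counting fold
theorem foldA_snd (l : List Char) :
    ∀ (m : Int) (d : PySem.Dict Char Int),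
      (l.foldl pvStepA (m, d)).2 = l.foldl (fun d x => d.insert x (d.getD x 0 + 1)) d := by
  induction l with
  | nil => intro m d; rfl
  | cons c t ih =>
    intro m d
    rw [List.foldl_cons, List.foldl_cons, pvStepA_eq]
    exact ih _ _

-- invariant of A's running max: it dominates all counts and is attained (or zero)
theorem foldA_fst (l : List Char) :
    ∀ (m : Int) (d : PySem.Dict Char Int),
      0 ≤ m → (∀ c, d.getD c 0 ≤ m) → (m = 0 ∨ ∃ c, d.getD c 0 = m) →
      0 ≤ (l.foldl pvStepA (m, d)).1 ∧
      (∀ c, (l.foldl pvStepA (m, d)).2.getD c 0 ≤ (l.foldl pvStepA (m, d)).1) ∧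
      ((l.foldl pvStepA (m, d)).1 = 0 ∨
        ∃ c, (l.foldl pvStepA (m, d)).2.getD c 0 = (l.foldl pvStepA (m, d)).1) := by
  induction l with
  | nil => intro m d h0 hdom hatt; exact ⟨h0, hdom, hatt⟩
  | cons c t ih =>
    intro m d h0 hdom hatt
    rw [List.foldl_cons, pvStepA_eq]
    dsimp only
    by_cases hgt : d.getD c 0 + 1 > m
    · rw [if_pos hgt]
      refine ih _ _ (by have := hdom c; omega) ?_ ?_
      · intro c'
        rw [PySem.Dict.getD_insert]
        split_ifs with h
        · omega
        · exact le_trans (hdom c') (by omega)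
      · right; exact ⟨c, by rw [PySem.Dict.getD_insert]; simp⟩
    · rw [if_neg hgt]
      refine ih _ _ h0 ?_ ?_
      · intro c'
        rw [PySem.Dict.getD_insert]
        split_ifs with h
        · omega
        · exact hdom c'
      · rcases hatt with h | ⟨c', hc'⟩
        · left; exact h
        · right
          refine ⟨c', ?_⟩
          rw [PySem.Dict.getD_insert]
          split_ifs with h
          · subst h; omega
          · exact hc'

-- B-side: distinct elements of a list, listed in first-occurrence order, have strictly
-- increasing first-occurrence indices
theorem ofList_pairwise_idxOf (cs : List Char) :
    (PySem.Set.ofList cs).Pairwise (fun a b => cs.idxOf a < cs.idxOf b) := by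
  induction cs with
  | nil => simp [PySem.Set.ofList]
  | cons x xs ih =>
    rw [PySem.Set.ofList_cons]
    refine List.pairwise_cons.mpr ⟨?_, ?_⟩
    · intro b hb
      obtain ⟨hb', hbx⟩ := (PySem.Set.mem_discard _ _ _).mp hb
      rw [List.idxOf_cons_self, List.idxOf_cons_ne _ (Ne.symm hbx)]
      exact Nat.succ_pos _
    · refine List.Pairwise.imp_of_mem ?_ (List.Pairwise.filter _ ih)
      intro a b ha hb hab
      have hax := ((PySem.Set.mem_discard _ _ _).mp ha).2
      have hbx := ((PySem.Set.mem_discard _ _ _).mp hb).2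
      rw [List.idxOf_cons_ne _ (Ne.symm hax), List.idxOf_cons_ne _ (Ne.symm hbx)]
      omega

-- B-side: the last distinct element of a ≤-sorted list is its maximum
theorem ofList_getLast?_of_max (c : Char) :
    ∀ (ls : List Char), ls.Pairwise (· ≤ ·) → c ∈ ls → (∀ x ∈ ls, x ≤ c) →
      (PySem.Set.ofList ls).getLast? = some c := by
  intro ls
  induction ls using List.reverseRecOn with
  | nil => intro _ hc _; simp at hc
  | append_singleton xs a ih =>
    intro hs hc hmax
    obtain ⟨hs', -, hxa⟩ := List.pairwise_append.mp hs
    have hac : a = c := by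
      rcases List.mem_append.mp hc with h | h
      · exact le_antisymm (hmax a (by simp)) (hxa c h a (by simp))
      · simp at h
        exact h.symm
    subst hac
    rw [PySem.Set.ofList_append_singleton]
    by_cases h : a ∈ xs
    · rw [PySem.Set.add_of_mem ((PySem.Set.mem_ofList _ _).mpr h)]
      exact ih hs' h (fun x hx => hxa x hx a (by simp))
    · rw [PySem.Set.add_of_not_mem (fun hmem => h ((PySem.Set.mem_ofList _ _).mp hmem))]
      exact List.getLast?_concat

-- B-side: Python list item assignment at index -1
theorem pySetD_append_neg_one (xs : List (Char × Int)) (x v : Char × Int) :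
    PySem.List.pySetD (xs ++ [x]) (-1) v = xs ++ [v] := by
  simp [PySem.List.pySetD, PySem.List.pySet?, PySem.List.pyIdx?]

-- B-side: run-length encoding a ≤-sorted char list yields each distinct char with its count,
-- in order
theorem groupRuns_sorted :
    ∀ (ls : List Char), ls.Pairwise (· ≤ ·) →
      ls.foldl pvRunsStep [] =
        (PySem.Set.ofList ls).map (fun c => (c, (ls.count c : Int))) := by
  intro ls
  induction ls using List.reverseRecOn with
  | nil => intro _; rfl
  | append_singleton xs a ih =>
    intro hs
    obtain ⟨hs', -, hxa⟩ := List.pairwise_append.mp hs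
    have hxa' : ∀ x ∈ xs, x ≤ a := fun x hx => hxa x hx a (by simp)
    rw [List.foldl_append, List.foldl_cons, List.foldl_nil, ih hs']
    by_cases ha : a ∈ xs
    · -- last run is exactly a's run: increment it
      have hlast := ofList_getLast?_of_max a xs hs' ha hxa'
      obtain ⟨init, hinit⟩ := List.getLast?_eq_some_iff.mp hlast
      have hnd : (PySem.Set.ofList xs).Nodup := PySem.Set.nodup_ofList xs
      rw [hinit] at hnd
      have hani : a ∉ init := by
        intro hmem
        exact (List.disjoint_of_nodup_append hnd) hmem (by simp)
      rw [hinit, List.map_append]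
      unfold pvRunsStep
      rw [if_pos ⟨by simp, by rw [List.map_singleton, PySem.List.pyGetD_neg_one_append_singleton]⟩]
      rw [List.map_singleton, PySem.List.pyGetD_neg_one_append_singleton,
        pySetD_append_neg_one]
      rw [PySem.Set.ofList_append_singleton,
        PySem.Set.add_of_mem ((PySem.Set.mem_ofList _ _).mpr ha), hinit, List.map_append]
      congr 1
      · refine List.map_congr_left ?_
        intro b hb
        have hba : b ≠ a := fun h => hani (h ▸ hb)
        simp [List.count_append, Ne.symm hba]
      · simp [List.count_append]
    · -- a starts a fresh run
      unfold pvRunsStep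
      rw [if_neg]
      · rw [PySem.Set.ofList_append_singleton,
          PySem.Set.add_of_not_mem (fun hmem => ha ((PySem.Set.mem_ofList _ _).mp hmem)),
          List.map_append]
        congr 1
        · refine List.map_congr_left ?_
          intro b hb
          have hb' : b ∈ xs := (PySem.Set.mem_ofList _ _).mp hb
          have hba : b ≠ a := fun h => ha (h ▸ hb')
          simp [List.count_append, Ne.symm hba]
        · simp [List.count_append, List.count_eq_zero_of_not_mem ha]
      · rintro ⟨hne, heq⟩
        have hne' : PySem.Set.ofList xs ≠ [] := by
          intro h
          rw [h] at hne
          simp at hne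
        rw [PySem.List.pyGetD_neg_one _ _ hne] at heq
        have hmem : ((PySem.Set.ofList xs).map
            (fun c => (c, ((xs.count c : Nat) : Int)))).getLast hne
            ∈ (PySem.Set.ofList xs).map (fun c => (c, ((xs.count c : Nat) : Int))) :=
          List.getLast_mem hne
        rw [List.getLast_map] at heq
        have : (PySem.Set.ofList xs).getLast (by simpa using hne') ∈ PySem.Set.ofList xs :=
          List.getLast_mem _
        have : (PySem.Set.ofList xs).getLast (by simpa using hne') ∈ xs :=
          (PySem.Set.mem_ofList _ _).mp this
        exact ha (heq ▸ this)

-- B-side: s.find of a single char that occurs in s is its first-occurrence index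
theorem find_go_singleton (c : Char) :
    ∀ (s : List Char) (j : Nat), c ∈ s →
      PySem.Chars.find.go [c] s j = ((j : Int) + (s.idxOf c : Int)) := by
  intro s
  induction s with
  | nil => intro j hc; simp at hc
  | cons h t ih =>
    intro j hc
    by_cases hch : c = h
    · subst hch
      rw [PySem.Chars.find.go]
      simp [List.isPrefixOf, List.idxOf_cons_self]
    · have hct : c ∈ t := by
        rcases List.mem_cons.mp hc with h' | h'
        · exact absurd h' hch
        · exact h'
      rw [PySem.Chars.find.go]
      have : ([c].isPrefixOf (h :: t)) = false := by
        simp [List.isPrefixOf, hch]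
      rw [this]
      simp only [Bool.false_eq_true, if_false]
      rw [ih (j + 1) hct, List.idxOf_cons_ne _ (fun h' => hch h'.symm)]
      push_cast
      ring

theorem str_find_singleton (w : String) (c : Char) (hc : c ∈ w.toList) :
    PySem.Str.find w (String.ofList [c]) = (w.toList.idxOf c : Int) := by
  show PySem.Chars.find w.toList (String.ofList [c]).toList = _
  rw [String.toList_ofList]
  unfold PySem.Chars.find
  rw [find_go_singleton c w.toList 0 hc]
  simp

-- B-side: Python min with a two-component key, as a fold (definitionally min2?)
def pvStep2 {α : Type} (k1 k2 : α → Int) (acc : Option α) (x : α) : Option α :=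
  match acc with
  | none => some x
  | some m =>
    if (decide (k1 x < k1 m) || !decide (k1 m < k1 x) && decide (k2 x < k2 m)) = true then some x
    else some m

theorem min2?_eq_foldl {α : Type} (xs : List α) (k1 k2 : α → Int) :
    PySem.List.min2? xs k1 k2 = xs.foldl (pvStep2 k1 k2) none := rfl

-- once the strict lexicographic minimum is the accumulator, it stays
theorem pvStep2_stay {α : Type} (k1 k2 : α → Int) (m : α) :
    ∀ (t : List α),
      (∀ x ∈ t, x = m ∨ k1 m < k1 x ∨ (k1 m = k1 x ∧ k2 m < k2 x)) →
      t.foldl (pvStep2 k1 k2) (some m) = some m := by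
  intro t
  induction t with
  | nil => intro _; rfl
  | cons x t ih =>
    intro h
    have hx := h x (by simp)
    have hcond : (decide (k1 x < k1 m) || !decide (k1 m < k1 x) && decide (k2 x < k2 m)) = false := by
      rcases hx with rfl | h1 | ⟨h1, h2⟩ <;> simp <;> omega
    have hstep : pvStep2 k1 k2 (some m) x = some m := by
      show (if (decide (k1 x < k1 m) || !decide (k1 m < k1 x) && decide (k2 x < k2 m)) = true
          then some x else some m) = some m
      rw [hcond]
      simp
    rw [List.foldl_cons, hstep]
    exact ih (fun y hy => h y (by simp [hy]))

-- and it is reached from any accumulator it strictly beats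
theorem pvStep2_reach {α : Type} (k1 k2 : α → Int) (m : α) :
    ∀ (t : List α) (a : α), m ∈ t →
      (∀ x ∈ t, x = m ∨ k1 m < k1 x ∨ (k1 m = k1 x ∧ k2 m < k2 x)) →
      (k1 m < k1 a ∨ (k1 m = k1 a ∧ k2 m < k2 a)) →
      t.foldl (pvStep2 k1 k2) (some a) = some m := by
  intro t
  induction t with
  | nil => intro a hm _ _; simp at hm
  | cons x t ih =>
    intro a hm h ha
    rw [List.foldl_cons]
    by_cases hxm : x = m
    · subst hxm
      have hcond : (decide (k1 x < k1 a) || !decide (k1 a < k1 x) && decide (k2 x < k2 a)) = true := by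
        rcases ha with h1 | ⟨h1, h2⟩ <;> simp <;> omega
      have hstep : pvStep2 k1 k2 (some a) x = some x := by
        show (if (decide (k1 x < k1 a) || !decide (k1 a < k1 x) && decide (k2 x < k2 a)) = true
            then some x else some a) = some x
        rw [hcond]
        simp
      rw [hstep]
      exact pvStep2_stay k1 k2 x t (fun y hy => h y (by simp [hy]))
    · have hm' : m ∈ t := by
        rcases List.mem_cons.mp hm with h' | h'
        · exact absurd h'.symm hxm
        · exact h'
      have hx : k1 m < k1 x ∨ (k1 m = k1 x ∧ k2 m < k2 x) := by
        rcases h x (by simp) with h' | h' | h'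
        · exact absurd h' hxm
        · exact Or.inl h'
        · exact Or.inr h'
      have h' : ∀ y ∈ t, y = m ∨ k1 m < k1 y ∨ (k1 m = k1 y ∧ k2 m < k2 y) :=
        fun y hy => h y (by simp [hy])
      cases hcond : (decide (k1 x < k1 a) || !decide (k1 a < k1 x) && decide (k2 x < k2 a)) with
      | true =>
        have hstep : pvStep2 k1 k2 (some a) x = some x := by
          show (if (decide (k1 x < k1 a) || !decide (k1 a < k1 x) && decide (k2 x < k2 a)) = true
              then some x else some a) = some x
          rw [hcond]
          simp
        rw [hstep]
        exact ih x hm' h' hx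
      | false =>
        have hstep : pvStep2 k1 k2 (some a) x = some a := by
          show (if (decide (k1 x < k1 a) || !decide (k1 a < k1 x) && decide (k2 x < k2 a)) = true
              then some x else some a) = some a
          rw [hcond]
          simp
        rw [hstep]
        exact ih a hm' h' ha

-- Python min with key: if one element strictly lexicographically beats every other, min returns it
theorem min2?_eq_of_strict {α : Type} (k1 k2 : α → Int) (xs : List α) (m : α)
    (hm : m ∈ xs) (h : ∀ x ∈ xs, x = m ∨ k1 m < k1 x ∨ (k1 m = k1 x ∧ k2 m < k2 x)) :
    PySem.List.min2? xs k1 k2 = some m := by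
  rw [min2?_eq_foldl]
  cases xs with
  | nil => simp at hm
  | cons y t =>
    rw [List.foldl_cons]
    show List.foldl (pvStep2 k1 k2) (some y) t = some m
    by_cases hym : y = m
    · subst hym
      exact pvStep2_stay k1 k2 y t (fun x hx => h x (by simp [hx]))
    · have hm' : m ∈ t := by
        rcases List.mem_cons.mp hm with h' | h'
        · exact absurd h'.symm hym
        · exact h'
      have hy : k1 m < k1 y ∨ (k1 m = k1 y ∧ k2 m < k2 y) := by
        rcases h y (by simp) with h' | h' | h'
        · exact absurd h' hym
        · exact Or.inl h'
        · exact Or.inr h'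
      exact pvStep2_reach k1 k2 m t y hm' (fun x hx => h x (by simp [hx])) hy

-- per word: B's sort + run-length + keyed min returns the first char (in first-occurrence
-- order) attaining the maximal count — the char A's rescan finds
theorem pickB_eq (w : String) (M : Int) (k : Char)
    (hk : (PySem.Set.ofList w.toList).find? (fun c => ((w.toList.count c : Int) == M)) = some k)
    (hbd : ∀ c, (w.toList.count c : Int) ≤ M) :
    pvPickB w = String.ofList [k] := by
  unfold pvPickB
  have hsorted : (PySem.List.sorted w.toList (fun c => c) false).Pairwise (· ≤ ·) := by
    simpa using PySem.List.sorted_pairwise w.toList (fun c => c)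
  have hperm : (PySem.List.sorted w.toList (fun c => c) false).Perm w.toList :=
    PySem.List.sorted_perm w.toList (fun c => c) false
  have hgroup := groupRuns_sorted (PySem.List.sorted w.toList (fun c => c) false) hsorted
  have hfun : (fun c => (c, ((PySem.List.sorted w.toList (fun c => c) false).count c : Int)))
      = (fun c => (c, (w.toList.count c : Int))) := by
    funext c
    rw [hperm.count_eq]
  rw [hgroup, hfun]
  -- facts from A's find?
  have hkmem : k ∈ PySem.Set.ofList w.toList := List.mem_of_find?_eq_some hk
  have hkmem' : k ∈ w.toList := (PySem.Set.mem_ofList _ _).mp hkmem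
  have hkM : (w.toList.count k : Int) = M := by
    have h := List.find?_some hk
    simpa using h
  obtain ⟨hpk, as, bs, hsplit, has⟩ := List.find?_eq_some_iff_append.mp hk
  have hpair := ofList_pairwise_idxOf w.toList
  rw [hsplit] at hpair
  obtain ⟨-, hpair2, hpair3⟩ := List.pairwise_append.mp hpair
  have hkbs : ∀ b ∈ bs, w.toList.idxOf k < w.toList.idxOf b :=
    (List.pairwise_cons.mp hpair2).1
  -- the set of distinct chars of sorted(w) is that of w, as a membership fact
  have hmemss : ∀ c, c ∈ PySem.Set.ofList (PySem.List.sorted w.toList (fun c => c) false)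
      ↔ c ∈ w.toList := by
    intro c
    rw [PySem.Set.mem_ofList]
    exact hperm.mem_iff
  -- B's keyed min returns (k, count k)
  have hmin : PySem.List.min2?
      ((PySem.Set.ofList (PySem.List.sorted w.toList (fun c => c) false)).map
        (fun c => (c, (w.toList.count c : Int))))
      (fun r => -r.2) (fun r => PySem.Str.find w (String.ofList [r.1]))
      = some (k, (w.toList.count k : Int)) := by
    refine min2?_eq_of_strict _ _ _ _ ?_ ?_
    · exact List.mem_map.mpr ⟨k, (hmemss k).mpr hkmem', rfl⟩
    · intro r hr
      obtain ⟨c, hc, rfl⟩ := List.mem_map.mp hr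
      have hcmem : c ∈ w.toList := (hmemss c).mp hc
      by_cases hck : c = k
      · subst hck; left; rfl
      · right
        dsimp only
        by_cases hcM : (w.toList.count c : Int) = M
        · -- tie on count: k occurs first in w
          right
          constructor
          · rw [hkM, hcM]
          · rw [str_find_singleton w k hkmem', str_find_singleton w c hcmem]
            have hcS : c ∈ as ++ k :: bs := by rw [← hsplit]; exact (PySem.Set.mem_ofList _ _).mpr hcmem
            have hcbs : c ∈ bs := by
              rcases List.mem_append.mp hcS with h' | h'
              · exfalso
                have := has c h'
                simp [hcM] at this
              · rcases List.mem_cons.mp h' with h'' | h''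
                · exact absurd h'' hck
                · exact h''
            exact_mod_cast hkbs c hcbs
        · -- strictly smaller count
          left
          have := hbd c
          rw [hkM]
          omega
  show (match PySem.List.min2?
      ((PySem.Set.ofList (PySem.List.sorted w.toList (fun c => c) false)).map
        (fun c => (c, (w.toList.count c : Int))))
      (fun r => -r.2) (fun r => PySem.Str.find w (String.ofList [r.1])) with
    | some r => String.ofList [r.1]
    | none => "") = String.ofList [k]
  rw [hmin]

-- "".join concatenates
theorem intercalate_nil (l : List (List Char)) :
    List.intercalate ([] : List Char) l = l.flatten := by
  induction l with
  | nil => rfl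
  | cons x xs ih =>
    cases xs with
    | nil => simp [List.intercalate, List.intersperse]
    | cons y t =>
      simp [List.intercalate, List.intersperse] at ih ⊢
      exact ih

theorem str_join_nil : PySem.Str.join "" [] = "" := rfl

theorem str_join_cons (s : String) (rest : List String) :
    PySem.Str.join "" (s :: rest) = s ++ PySem.Str.join "" rest := by
  simp [PySem.Str.join, PySem.Chars.join, intercalate_nil, String.ofList_append,
    String.ofList_toList]

-- per-word agreement: A's count-then-rescan equals B's sort + run-length + keyed min
theorem word_agree (w : String) (hne : w.toList ≠ []) (result : String) :
    (let st := (PySem.List.pyRange 0 (PySem.Str.len w)).foldl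
        (fun p i => pvStepA p (PySem.List.pyGetD w.toList i ' '))
        ((0 : Int), (PySem.Dict.empty : PySem.Dict Char Int))
     match st.2.items.find? (fun kv => kv.2 == st.1) with
      | some kv => result ++ String.ofList [kv.1]
      | none => result) = result ++ pvPickB w := by
  have hlen : PySem.Str.len w = PySem.List.len w.toList := by
    rw [PySem.Str.len_eq]; rfl
  rw [hlen,
    PySem.List.foldl_pyRange_pyGetD w.toList ' ' pvStepA
      ((0 : Int), (PySem.Dict.empty : PySem.Dict Char Int)) (le_refl 0)]
  rw [show ((0 : Int).toNat) = 0 from rfl, List.drop_zero]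
  set cs := w.toList with hcs
  set st := cs.foldl pvStepA ((0 : Int), (PySem.Dict.empty : PySem.Dict Char Int)) with hst
  have hsnd : st.2 = PySem.Dict.counter cs := by
    rw [hst, foldA_snd]
    exact PySem.Dict.foldl_insert_getD_add_one_eq_counter cs
  obtain ⟨h0, hdom, hatt⟩ := foldA_fst cs 0 PySem.Dict.empty (le_refl 0)
    (fun c => by rw [PySem.Dict.getD_empty]) (Or.inl rfl)
  rw [← hst] at h0 hdom hatt
  have hcount : ∀ c, (cs.count c : Int) ≤ st.1 := by
    intro c; have := hdom c; rwa [hsnd, PySem.Dict.getD_counter] at this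
  obtain ⟨c0, t0, hc0⟩ := List.exists_cons_of_ne_nil hne
  have hc0mem : c0 ∈ cs := by rw [hc0]; simp
  have h1 : (1 : Int) ≤ st.1 := by
    have := hcount c0
    have hp : 0 < cs.count c0 := List.count_pos_iff.mpr hc0mem
    omega
  have hattc : ∃ c, (cs.count c : Int) = st.1 := by
    rcases hatt with h | ⟨c, hc⟩
    · omega
    · exact ⟨c, by rwa [hsnd, PySem.Dict.getD_counter] at hc⟩
  obtain ⟨cstar, hcstar⟩ := hattc
  have hcstarmem : cstar ∈ cs := by
    have : 0 < cs.count cstar := by omega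
    exact List.count_pos_iff.mp this
  have hitems : st.2.items = (PySem.Set.ofList cs).map (fun k => (k, (cs.count k : Int))) := by
    rw [hsnd, PySem.Dict.items_counter]
  have hfind : ∃ k, (PySem.Set.ofList cs).find? (fun k => ((cs.count k : Int) == st.1)) = some k := by
    rw [← Option.isSome_iff_exists, List.find?_isSome]
    exact ⟨cstar, (PySem.Set.mem_ofList cs cstar).mpr hcstarmem, by simp [hcstar]⟩
  obtain ⟨k, hk⟩ := hfind
  have hA : st.2.items.find? (fun kv => kv.2 == st.1) = some (k, (cs.count k : Int)) := by
    rw [hitems, List.find?_map]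
    rw [show ((fun kv : Char × Int => kv.2 == st.1) ∘ (fun k => (k, (cs.count k : Int))))
        = fun k => ((cs.count k : Int) == st.1) from rfl]
    rw [hk]
    rfl
  have hB : pvPickB w = String.ofList [k] := pickB_eq w st.1 k (by rw [← hcs]; exact hk) hcount
  simp only [hA, hB]

-- A's outer loop appends exactly the picks of the odd-length lowered words
theorem foldA_join : ∀ (l : List String) (r : String),
    l.foldl (fun result word =>
      if PySem.Str.len (PySem.Str.lower word) % 2 ≠ 0 then
        let st := (PySem.List.pyRange 0 (PySem.Str.len (PySem.Str.lower word))).foldl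
          (fun p i => pvStepA p (PySem.List.pyGetD (PySem.Str.lower word).toList i ' '))
          ((0 : Int), (PySem.Dict.empty : PySem.Dict Char Int))
        match st.2.items.find? (fun kv => kv.2 == st.1) with
        | some kv => result ++ String.ofList [kv.1]
        | none => result
      else result) r
    = r ++ PySem.Str.join ""
        ((l.filter (fun word => PySem.Str.len (PySem.Str.lower word) % 2 == 1)).map
          (fun word => pvPickB (PySem.Str.lower word))) := by
  intro l
  induction l with
  | nil => intro r; simp [str_join_nil]
  | cons x t ih =>
    intro r
    rw [List.foldl_cons]
    by_cases hc : PySem.Str.len (PySem.Str.lower x) % 2 = 0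
    · have hb' : (PySem.Str.len (PySem.Str.lower x) % 2 == 1) = false := by
        rw [hc]; decide
      rw [if_neg (not_not_intro hc), ih r,
        show (List.filter (fun word => PySem.Str.len (PySem.Str.lower word) % 2 == 1) (x :: t))
            = List.filter (fun word => PySem.Str.len (PySem.Str.lower word) % 2 == 1) t from by
          simp only [List.filter_cons, hb', Bool.false_eq_true, if_false]]
    · have hb : (PySem.Str.len (PySem.Str.lower x) % 2 == 1) = true := by
        rcases Int.emod_two_eq (PySem.Str.len (PySem.Str.lower x)) with h | h
        · exact absurd h hc
        · rw [h]; decide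
      have hne : (PySem.Str.lower x).toList ≠ [] := by
        intro h
        apply hc
        rw [PySem.Str.len_eq, h]
        rfl
      rw [if_pos hc, word_agree _ hne r, ih (r ++ pvPickB (PySem.Str.lower x)),
        show (List.filter (fun word => PySem.Str.len (PySem.Str.lower word) % 2 == 1) (x :: t))
            = x :: List.filter (fun word => PySem.Str.len (PySem.Str.lower word) % 2 == 1) t from by
          simp only [List.filter_cons, hb, if_true],
        List.map_cons, str_join_cons, String.append_assoc]

-- B's outer loop collects those same picks in a list
theorem foldB_eq (l : List String) :
    l.foldl (fun picks word =>
      let w := PySem.Str.lower word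
      if PySem.Str.len w % 2 == 1 then picks ++ [pvPickB w] else picks) ([] : List String) =
    (l.filter (fun word => PySem.Str.len (PySem.Str.lower word) % 2 == 1)).map
      (fun word => pvPickB (PySem.Str.lower word)) := by
  have h := PySem.List.foldl_append_if
    (fun word => PySem.Str.len (PySem.Str.lower word) % 2 == 1)
    (fun word => pvPickB (PySem.Str.lower word)) l ([] : List String)
  simpa using h

-- ===== VERDICT (by name: the statement is the Claim_ definition above) =====
theorem original_solution_spec : Claim_equal_original_solution := by
  unfold Claim_equal_original_solution Spec_original_solution
  intro sentence _
  unfold original_solution original_solution_alt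
  simp only [List.foldl_map]
  rw [foldA_join, foldB_eq]
  simp
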